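-- pv_equiv track=rewrite | github.com/mattibuzzo13/graph-of-marks | src/igp/relations/inference.py | _get_relation_priority
-- ===== SOURCE A (Python) =====
-- def _get_relation_priority(relation: str) -> int:
--     """Assign a numeric priority to a relation."""
--     rel_name = str(relation).lower()
--
--     # 4: strong semantic relations
--     semantic_strong = {"on_top_of", "under", "holding", "wearing", "riding", "sitting_on", "carrying"}
--     if any(sem in rel_name for sem in semantic_strong):
--         return 4
--
--     # 3: contact/adjacency
--     spatial_contact = {"touching", "adjacent"}
--     if any(contact in rel_name for contact in spatial_contact):
--         return 3
--
--     # 2: generic proximity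
--     spatial_generic = {"near", "close"}
--     if any(gen in rel_name for gen in spatial_generic):
--         return 2
--
--     # 1: directional spatial cues
--     spatial_directional = {"left_of", "right_of", "above", "below", "in_front_of", "behind"}
--     if any(dir_rel in rel_name for dir_rel in spatial_directional):
--         return 1
--
--     # 0: others
--     return 0
-- ===== SOURCE B (Python) =====
-- _PRIORITY_TABLE = [
--     ("on_top_of", 4), ("under", 4), ("holding", 4), ("wearing", 4),
--     ("riding", 4), ("sitting_on", 4), ("carrying", 4),
--     ("touching", 3), ("adjacent", 3),
--     ("near", 2), ("close", 2),
--     ("left_of", 1), ("right_of", 1), ("above", 1), ("below", 1),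
--     ("in_front_of", 1), ("behind", 1),
-- ]
--
--
-- def _get_relation_priority(relation: str) -> int:
--     """Assign a numeric priority to a relation."""
--     rel_name = str(relation).lower()
--     best = 0
--     for sub, priority in _PRIORITY_TABLE:
--         if sub in rel_name:
--             best = max(best, priority)
--     return best
-- ===== Notes on version B (the rewrite author's own statement) =====
-- stated objective: simpler
-- what changed: Replaces the four-tier early-return cascade over separate sets with one flat (substring, priority) table and a single running-max loop with default 0; correct because the cascade's tiers are checked in strictly descending priority, so first match equals max match.
import Mathlib
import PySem

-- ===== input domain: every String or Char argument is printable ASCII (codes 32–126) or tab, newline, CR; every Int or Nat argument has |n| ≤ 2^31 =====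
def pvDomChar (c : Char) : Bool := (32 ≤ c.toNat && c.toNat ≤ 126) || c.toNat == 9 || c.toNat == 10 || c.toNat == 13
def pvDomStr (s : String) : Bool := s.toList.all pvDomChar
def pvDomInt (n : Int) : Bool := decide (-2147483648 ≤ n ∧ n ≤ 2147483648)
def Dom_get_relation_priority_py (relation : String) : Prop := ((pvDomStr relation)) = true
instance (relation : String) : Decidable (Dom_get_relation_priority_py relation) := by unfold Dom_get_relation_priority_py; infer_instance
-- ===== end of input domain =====

-- B replaces A's four-tier early-return cascade with one flat (substring, priority)
-- table and a running max (objective: simpler).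

-- ===== PORT A =====
def get_relation_priority_py (relation : String) : Int :=
  let rel_name := PySem.Str.lower relation
  let semantic_strong : PySem.Set String :=
    PySem.Set.ofList ["on_top_of", "under", "holding", "wearing", "riding", "sitting_on", "carrying"]
  if semantic_strong.any (fun sem => PySem.Str.isIn sem rel_name) then 4
  else
    let spatial_contact : PySem.Set String := PySem.Set.ofList ["touching", "adjacent"]
    if spatial_contact.any (fun contact => PySem.Str.isIn contact rel_name) then 3
    else
      let spatial_generic : PySem.Set String := PySem.Set.ofList ["near", "close"]
      if spatial_generic.any (fun gen => PySem.Str.isIn gen rel_name) then 2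
      else
        let spatial_directional : PySem.Set String :=
          PySem.Set.ofList ["left_of", "right_of", "above", "below", "in_front_of", "behind"]
        if spatial_directional.any (fun dir_rel => PySem.Str.isIn dir_rel rel_name) then 1
        else 0

-- ===== PORT B =====
def pvPriorityTable : List (String × Int) :=
  [("on_top_of", 4), ("under", 4), ("holding", 4), ("wearing", 4),
   ("riding", 4), ("sitting_on", 4), ("carrying", 4),
   ("touching", 3), ("adjacent", 3),
   ("near", 2), ("close", 2),
   ("left_of", 1), ("right_of", 1), ("above", 1), ("below", 1),
   ("in_front_of", 1), ("behind", 1)]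

def get_relation_priority_py_alt (relation : String) : Int :=
  let rel_name := PySem.Str.lower relation
  pvPriorityTable.foldl
    (fun best sp => if PySem.Str.isIn sp.1 rel_name then max best sp.2 else best) 0

-- ===== PRECONDITION & SPEC =====
def Spec_get_relation_priority_py (relation : String) (out : Int) : Prop := out = get_relation_priority_py_alt relation
instance (relation : String) (out : Int) : Decidable (Spec_get_relation_priority_py relation out) := by unfold Spec_get_relation_priority_py; infer_instance

-- ===== CLAIM (what is proved, stated in full; the proofs are below) =====
def Claim_equal_get_relation_priority_py : Prop := ∀ (relation : String), Dom_get_relation_priority_py relation → Spec_get_relation_priority_py relation (get_relation_priority_py relation)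

-- ===== LEMMAS AND PROOFS =====

-- Folding B's step over a tier of entries that all carry the same priority p
-- is 'max acc p' iff some substring of the tier matches, else acc.
theorem pv_fold_tier (r : String) (p acc : Int) (subs : List String) :
    (subs.map (fun s => (s, p))).foldl
      (fun best sp => if PySem.Str.isIn sp.1 r then max best sp.2 else best) acc
    = if subs.any (fun s => PySem.Str.isIn s r) then max acc p else acc := by
  induction subs generalizing acc with
  | nil => simp
  | cons h t ih =>
      by_cases hh : PySem.Str.isIn h r
      · simp only [List.map_cons, List.foldl_cons, List.any_cons, hh, Bool.true_or,
          if_true, ih]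
        split
        · simp
        · rfl
      · have hf : PySem.Str.isIn h r = false := by
          revert hh; cases (PySem.Str.isIn h r) <;> simp
        rw [List.map_cons, List.foldl_cons, List.any_cons, hf]
        simp only [Bool.false_or, Bool.false_eq_true, if_false, ih]

theorem get_relation_priority_py_spec : Claim_equal_get_relation_priority_py := by
  intro relation _
  unfold Spec_get_relation_priority_py get_relation_priority_py get_relation_priority_py_alt
  set r := PySem.Str.lower relation with hr
  have htab : pvPriorityTable =
      (["on_top_of", "under", "holding", "wearing", "riding", "sitting_on", "carrying"].map (fun s => (s, (4 : Int))))
      ++ (["touching", "adjacent"].map (fun s => (s, (3 : Int))))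
      ++ (["near", "close"].map (fun s => (s, (2 : Int))))
      ++ (["left_of", "right_of", "above", "below", "in_front_of", "behind"].map (fun s => (s, (1 : Int)))) := rfl
  have h4 : PySem.Set.ofList ["on_top_of", "under", "holding", "wearing", "riding", "sitting_on", "carrying"]
      = ["on_top_of", "under", "holding", "wearing", "riding", "sitting_on", "carrying"] := by decide
  have h3 : PySem.Set.ofList ["touching", "adjacent"] = ["touching", "adjacent"] := by decide
  have h2 : PySem.Set.ofList ["near", "close"] = ["near", "close"] := by decide
  have h1 : PySem.Set.ofList ["left_of", "right_of", "above", "below", "in_front_of", "behind"]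
      = ["left_of", "right_of", "above", "below", "in_front_of", "behind"] := by decide
  rw [htab]
  simp only [List.foldl_append, pv_fold_tier, h4, h3, h2, h1]
  generalize (["on_top_of", "under", "holding", "wearing", "riding", "sitting_on", "carrying"] : List String).any (fun s => PySem.Str.isIn s r) = a4
  generalize (["touching", "adjacent"] : List String).any (fun s => PySem.Str.isIn s r) = a3
  generalize (["near", "close"] : List String).any (fun s => PySem.Str.isIn s r) = a2
  generalize (["left_of", "right_of", "above", "below", "in_front_of", "behind"] : List String).any (fun s => PySem.Str.isIn s r) = a1
  cases a4 <;> cases a3 <;> cases a2 <;> cases a1 <;> simp
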